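-- pv_equiv track=rewrite | github.com/pypi-data/pypi-mirror-370 | packages/spec-driven-mcp/spec_driven_mcp-0.0.1.tar.gz/spec_driven_mcp-0.0.1/spec_mcp/db.py | roll_up_status
-- ===== SOURCE A (Python) =====
-- def roll_up_status(statuses: list[str]) -> str:
--     if not statuses:
--         return 'UNTESTED'
--     if any(s == 'FAILING' for s in statuses):
--         return 'FAILING'
--     if all(s == 'VERIFIED' for s in statuses):
--         return 'VERIFIED'
--     if any(s == 'VERIFIED' for s in statuses) and not any(s == 'FAILING' for s in statuses):
--         return 'PARTIAL'
--     return 'UNTESTED'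
-- ===== SOURCE B (Python) =====
-- def roll_up_status(statuses: list[str]) -> str:
--     has_failing = has_verified = has_other = False
--     for s in statuses:
--         if s == 'FAILING':
--             has_failing = True
--         elif s == 'VERIFIED':
--             has_verified = True
--         else:
--             has_other = True
--     if has_failing:
--         return 'FAILING'
--     if has_verified and not has_other:
--         return 'VERIFIED'
--     if has_verified:
--         return 'PARTIAL'
--     return 'UNTESTED'
-- ===== Notes on version B (the rewrite author's own statement) =====
-- stated objective: simpler
-- what changed: Replaced A's four separate any()/all() scans with a single pass that accumulates three flags (has_failing, has_verified, has_other) and decides the rollup from the flags; the empty list falls through to UNTESTED naturally.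
import Mathlib
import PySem

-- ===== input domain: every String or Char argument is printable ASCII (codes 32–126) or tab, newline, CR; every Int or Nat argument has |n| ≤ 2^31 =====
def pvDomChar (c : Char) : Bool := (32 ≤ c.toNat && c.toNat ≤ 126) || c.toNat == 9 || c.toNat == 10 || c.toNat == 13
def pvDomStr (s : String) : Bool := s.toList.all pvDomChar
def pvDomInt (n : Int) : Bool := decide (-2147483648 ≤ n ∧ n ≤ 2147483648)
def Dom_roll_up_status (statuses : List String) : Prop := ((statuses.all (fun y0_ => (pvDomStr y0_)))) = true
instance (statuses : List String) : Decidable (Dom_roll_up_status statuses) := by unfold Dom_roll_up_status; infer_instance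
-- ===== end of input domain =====

-- B replaces A's four separate any()/all() scans with a single flag-accumulating pass (objective: simpler).

-- ===== PORT A =====
def roll_up_status (statuses : List String) : String :=
  if statuses.isEmpty then "UNTESTED"
  else if statuses.any (fun s => s == "FAILING") then "FAILING"
  else if statuses.all (fun s => s == "VERIFIED") then "VERIFIED"
  else if statuses.any (fun s => s == "VERIFIED") && !(statuses.any (fun s => s == "FAILING")) then "PARTIAL"
  else "UNTESTED"

-- ===== PORT B =====
-- single pass accumulating (has_failing, has_verified, has_other)
def roll_up_status_alt (statuses : List String) : String :=
  let f := statuses.foldl (fun (acc : Bool × Bool × Bool) s =>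
      if s == "FAILING" then (true, acc.2.1, acc.2.2)
      else if s == "VERIFIED" then (acc.1, true, acc.2.2)
      else (acc.1, acc.2.1, true)) (false, false, false)
  if f.1 then "FAILING"
  else if f.2.1 && !f.2.2 then "VERIFIED"
  else if f.2.1 then "PARTIAL"
  else "UNTESTED"

-- ===== PRECONDITION & SPEC =====
def Spec_roll_up_status (statuses : List String) (out : String) : Prop := out = roll_up_status_alt statuses
instance (statuses : List String) (out : String) : Decidable (Spec_roll_up_status statuses out) := by unfold Spec_roll_up_status; infer_instance

-- ===== CLAIM (what is proved, stated in full; the proofs are below) =====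
def Claim_equal_roll_up_status : Prop := ∀ (statuses : List String), Dom_roll_up_status statuses → Spec_roll_up_status statuses (roll_up_status statuses)

-- ===== LEMMAS AND PROOFS =====

theorem roll_flags (statuses : List String) (a b c : Bool) :
    statuses.foldl (fun (acc : Bool × Bool × Bool) s =>
      if s == "FAILING" then (true, acc.2.1, acc.2.2)
      else if s == "VERIFIED" then (acc.1, true, acc.2.2)
      else (acc.1, acc.2.1, true)) (a, b, c)
    = (a || statuses.any (fun s => s == "FAILING"),
       b || statuses.any (fun s => s == "VERIFIED"),
       c || statuses.any (fun s => !(s == "FAILING") && !(s == "VERIFIED"))) := by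
  induction statuses generalizing a b c with
  | nil => simp
  | cons x xs ih =>
      by_cases hf : x == "FAILING"
      · have hx : x = "FAILING" := by simpa using hf
        rw [List.foldl_cons, if_pos hf, ih]
        simp [List.any_cons, hx]
      · by_cases hv : x == "VERIFIED"
        · rw [List.foldl_cons, if_neg hf, if_pos hv, ih]
          simp [List.any_cons, hf, hv]
        · rw [List.foldl_cons, if_neg hf, if_neg hv, ih]
          simp [List.any_cons, hf, hv]

-- ===== VERDICT (by name: the statement is the Claim_ definition above) =====
theorem roll_up_status_spec : Claim_equal_roll_up_status := by
  intro statuses _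
  show roll_up_status statuses = roll_up_status_alt statuses
  unfold roll_up_status roll_up_status_alt
  rw [roll_flags]
  simp only [Bool.false_or]
  cases statuses with
  | nil => simp
  | cons x xs =>
      simp only [List.isEmpty_cons, if_neg Bool.false_ne_true]
      by_cases hf : (x :: xs).any (fun s => s == "FAILING")
      · simp [hf]
      · by_cases hv : (x :: xs).all (fun s => s == "VERIFIED")
        · have h1 : (x :: xs).any (fun s => s == "VERIFIED") = true := by
            simp only [List.all_eq_true] at hv
            exact List.any_eq_true.mpr ⟨x, List.mem_cons_self, hv x List.mem_cons_self⟩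
          have h2 : (x :: xs).any (fun s => !(s == "FAILING") && !(s == "VERIFIED")) = false := by
            simp only [List.all_eq_true] at hv
            simp only [List.any_eq_false]
            intro s hs; simp [hv s hs]
          simp [hf, hv, h1, h2]
        · have h2 : (x :: xs).any (fun s => !(s == "FAILING") && !(s == "VERIFIED")) = true := by
            simp only [List.all_eq_true, not_forall] at hv
            obtain ⟨s, hs, hsv⟩ := hv
            have hsf : (s == "FAILING") = false := by
              rcases Bool.eq_false_or_eq_true (s == "FAILING") with h | h
              · exact absurd (List.any_eq_true.mpr ⟨s, hs, h⟩) hf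
              · exact h
            exact List.any_eq_true.mpr ⟨s, hs, by simp [hsf, hsv]⟩
          by_cases hv2 : (x :: xs).any (fun s => s == "VERIFIED")
          · simp [hf, hv, h2, hv2]
          · simp [hf, hv, h2, hv2]
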